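-- pv_equiv track=rewrite | github.com/LuisJRubioH/Retos_Python | Retos_21_dias_de_python/dia_05_b.py | find_largest_palindrome
-- ===== SOURCE A (Python) =====
-- def is_palindrome(word:str):
--     """Determina si una palabra es o no un palíndromo
--     Args:
--         word: str
--     Returns:
--         bool: True si es palíndromo y false en caso contrario
--     """
--     if word == word[::-1]:
--         return True
--     return False
--
-- def find_largest_palindrome(list_words):
--     """
--     Encuentra el la palabra más larga en una lista si esta es un palíndromo
--     Args:
--         list_words: list[str]
--
--     Returns:
--         str: Palíndromo de máxima longitud o None si no hay ningún en la lista.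
--
--     """
--     max_long  = 0
--     for word in list_words:
--         if is_palindrome(word) and len(word) > max_long:
--                 max_long = len(word)
--
--     for word in list_words:
--         if is_palindrome(word) and len(word) == max_long:
--             return  word
--
--     return None
-- ===== SOURCE B (Python) =====
-- def find_largest_palindrome(list_words):
--     best = None
--     for word in list_words:
--         if word == word[::-1] and (best is None or len(word) > len(best)):
--             best = word
--     return best
-- ===== Notes on version B (the rewrite author's own statement) =====
-- stated objective: simpler
-- what changed: Replaced A's two scans (first compute the maximal palindrome length, then rescan for the first word of that length) by a single pass that maintains the best palindrome directly in an Option accumulator with a strict-greater update.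
import Mathlib
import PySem

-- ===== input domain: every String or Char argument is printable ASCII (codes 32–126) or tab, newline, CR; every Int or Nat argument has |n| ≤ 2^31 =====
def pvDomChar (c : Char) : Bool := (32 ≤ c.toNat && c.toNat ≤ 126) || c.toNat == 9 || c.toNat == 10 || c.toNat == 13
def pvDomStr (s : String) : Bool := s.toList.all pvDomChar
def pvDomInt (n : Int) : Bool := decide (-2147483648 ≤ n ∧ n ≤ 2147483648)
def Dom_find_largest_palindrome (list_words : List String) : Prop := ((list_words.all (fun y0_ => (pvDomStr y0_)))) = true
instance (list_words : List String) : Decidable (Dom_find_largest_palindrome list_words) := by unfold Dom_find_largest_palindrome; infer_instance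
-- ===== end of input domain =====

-- B replaces A's two scans (max length, then rescan) by one pass keeping the best palindrome; objective: simpler.

-- ===== PORT A =====
-- is_palindrome: word == word[::-1]
def is_palindrome (word : String) : Bool :=
  if word = (PySem.Str.slice? word none none (-1)).getD word then true else false

-- second loop of A: return the first palindrome of length max_long (early return)
def flp_scan (max_long : Nat) : List String → Option String
  | [] => none
  | word :: rest =>
      if is_palindrome word ∧ word.length = max_long then some word
      else flp_scan max_long rest

def find_largest_palindrome (list_words : List String) : Option String :=
  let max_long := list_words.foldl
    (fun max_long word => if is_palindrome word ∧ word.length > max_long then word.length else max_long) 0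
  flp_scan max_long list_words

-- ===== PORT B =====
def find_largest_palindrome_alt (list_words : List String) : Option String :=
  list_words.foldl
    (fun best word =>
      if (word == (PySem.Str.slice? word none none (-1)).getD word)
          && (match best with | none => true | some b => decide (word.length > b.length))
      then some word else best)
    none

-- ===== PRECONDITION & SPEC =====
def Spec_find_largest_palindrome (list_words : List String) (out : Option String) : Prop := out = find_largest_palindrome_alt list_words
instance (list_words : List String) (out : Option String) : Decidable (Spec_find_largest_palindrome list_words out) := by unfold Spec_find_largest_palindrome; infer_instance

-- ===== CLAIM (what is proved, stated in full; the proofs are below) =====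
def Claim_equal_find_largest_palindrome : Prop := ∀ (list_words : List String), Dom_find_largest_palindrome list_words → Spec_find_largest_palindrome list_words (find_largest_palindrome list_words)

-- ===== LEMMAS AND PROOFS =====

-- common specification: the first palindrome of maximal length
def pvSpec : List String → Option String
  | [] => none
  | w :: t =>
      if is_palindrome w then
        match pvSpec t with
        | none => some w
        | some b => if b.length > w.length then some b else some w
      else pvSpec t

def pvMerge : Option String → Option String → Option String
  | b, none => b
  | none, some s => some s
  | some b, some s => if s.length > b.length then some s else some b

def pvPm : List String → Nat
  | [] => 0
  | w :: t => if is_palindrome w then max w.length (pvPm t) else pvPm t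

def pvBstep : Option String → String → Option String :=
  fun best word =>
    if (word == (PySem.Str.slice? word none none (-1)).getD word)
        && (match best with | none => true | some b => decide (word.length > b.length))
    then some word else best

theorem alt_eq_foldl (l : List String) :
    find_largest_palindrome_alt l = l.foldl pvBstep none := rfl

theorem pal_check (w : String) :
    (w == (PySem.Str.slice? w none none (-1)).getD w) = is_palindrome w := by
  unfold is_palindrome
  by_cases h : w = (PySem.Str.slice? w none none (-1)).getD w
  · rw [if_pos h]; exact beq_iff_eq.mpr h
  · rw [if_neg h]; exact beq_eq_false_iff_ne.mpr h

theorem bstep_none (w : String) :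
    pvBstep none w = if is_palindrome w then some w else none := by
  simp only [pvBstep, pal_check]
  cases is_palindrome w <;> simp

theorem bstep_some (w a : String) :
    pvBstep (some a) w =
      if is_palindrome w && decide (w.length > a.length) then some w else some a := by
  simp only [pvBstep, pal_check]

theorem merge_step (w : String) (t : List String) (best : Option String) :
    pvMerge (pvBstep best w) (pvSpec t) = pvMerge best (pvSpec (w :: t)) := by
  by_cases hp : is_palindrome w = true
  · cases best with
    | none =>
      simp only [bstep_none, hp, if_pos, pvSpec]
      cases h : pvSpec t with
      | none => simp [pvMerge]
      | some b => simp only [pvMerge]; split_ifs <;> simp [pvMerge] <;> omega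
    | some a =>
      simp only [bstep_some, hp, true_and, Bool.true_and, pvSpec, if_pos]
      cases h : pvSpec t with
      | none =>
        by_cases hc : w.length > a.length <;> simp [hc, pvMerge]
      | some b =>
        by_cases hc : w.length > a.length <;>
          by_cases hb : b.length > w.length <;>
            simp only [hc, hb, decide_true, decide_false, if_true, if_false, pvMerge] <;>
              split_ifs <;> simp_all [pvMerge] <;> omega
  · simp only [Bool.not_eq_true] at hp
    cases best <;>
      simp [bstep_none, bstep_some, hp, pvSpec, pvMerge]

theorem b_fold (l : List String) (best : Option String) :
    l.foldl pvBstep best = pvMerge best (pvSpec l) := by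
  induction l generalizing best with
  | nil => cases best <;> simp [pvMerge, pvSpec]
  | cons w t ih =>
    rw [List.foldl_cons, ih, merge_step]

theorem a_maxfold (l : List String) (a : Nat) :
    l.foldl
      (fun max_long word => if is_palindrome word ∧ word.length > max_long then word.length else max_long)
      a = max a (pvPm l) := by
  induction l generalizing a with
  | nil => simp [pvPm]
  | cons w t ih =>
    simp only [List.foldl_cons, ih, pvPm]
    by_cases hp : is_palindrome w = true
    · by_cases hc : w.length > a <;> simp [hp, hc] <;> omega
    · simp [hp]

theorem spec_none_no_pal (l : List String) (h : pvSpec l = none) :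
    ∀ w ∈ l, ¬ is_palindrome w = true := by
  induction l with
  | nil => simp
  | cons w t ih =>
    intro x hx
    by_cases hp : is_palindrome w = true
    · exfalso
      simp only [pvSpec, hp, if_pos] at h
      cases hs : pvSpec t <;> simp [hs] at h
      split at h <;> simp_all
    · simp only [pvSpec, hp, if_neg, Bool.false_eq_true] at h
      rcases List.mem_cons.mp hx with hx' | hx'
      · simpa [hx'] using hp
      · exact ih h x hx'

theorem spec_none_pm (l : List String) (h : pvSpec l = none) : pvPm l = 0 := by
  induction l with
  | nil => simp [pvPm]
  | cons w t ih =>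
    by_cases hp : is_palindrome w = true
    · exfalso
      simp only [pvSpec, hp, if_pos] at h
      cases hs : pvSpec t <;> simp [hs] at h
      split at h <;> simp_all
    · simp only [pvSpec, hp, if_neg, Bool.false_eq_true] at h
      simp [pvPm, hp, ih h]

theorem spec_some_pm (l : List String) (b : String) (h : pvSpec l = some b) :
    b.length = pvPm l := by
  induction l generalizing b with
  | nil => simp [pvSpec] at h
  | cons w t ih =>
    by_cases hp : is_palindrome w = true
    · simp only [pvSpec, hp, if_pos] at h
      simp only [pvPm, hp, if_pos]
      cases hs : pvSpec t with
      | none =>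
        simp [hs] at h
        simp [← h, spec_none_pm t hs]
      | some c =>
        have hc := ih c hs
        simp only [hs] at h
        split at h <;> simp_all <;> omega
    · simp only [pvSpec, hp, if_neg, Bool.false_eq_true] at h
      simp only [pvPm, hp, if_neg, Bool.false_eq_true]
      exact ih b h

theorem scan_none (m : Nat) (l : List String) (h : ∀ w ∈ l, ¬ is_palindrome w = true) :
    flp_scan m l = none := by
  induction l with
  | nil => rfl
  | cons w t ih =>
    have hw := h w (by simp)
    simp only [flp_scan]
    rw [if_neg (by simp [hw])]
    exact ih (fun x hx => h x (by simp [hx]))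

theorem scan_some (l : List String) (b : String) (m : Nat)
    (h : pvSpec l = some b) (hm : b.length = m) :
    flp_scan m l = some b := by
  induction l generalizing b with
  | nil => simp [pvSpec] at h
  | cons w t ih =>
    by_cases hp : is_palindrome w = true
    · simp only [pvSpec, hp, if_pos] at h
      cases hs : pvSpec t with
      | none =>
        simp [hs] at h
        subst h
        simp [flp_scan, hp, hm]
      | some c =>
        simp only [hs] at h
        by_cases hc : c.length > w.length
        · simp only [hc, if_pos] at h
          have hcm : c.length = m := by rw [← hm, ← Option.some_inj.mp h]
          have hne : ¬ (is_palindrome w = true ∧ w.length = m) := by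
            intro ⟨_, he⟩; omega
          simp only [flp_scan, if_neg hne]
          rw [← Option.some_inj.mp h] at hm ⊢
          exact ih c hs hm
        · simp only [hc, if_neg, Bool.false_eq_true] at h
          rw [← Option.some_inj.mp h] at hm
          simp only [flp_scan]
          rw [if_pos ⟨hp, hm⟩, Option.some_inj.mp h]
    · simp only [pvSpec, hp, if_neg, Bool.false_eq_true] at h
      simp only [flp_scan]
      rw [if_neg (by simp [hp])]
      exact ih b h hm

-- ===== VERDICT (by name: the statement is the Claim_ definition above) =====
theorem find_largest_palindrome_spec : Claim_equal_find_largest_palindrome := by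
  intro l _
  unfold Spec_find_largest_palindrome find_largest_palindrome
  rw [alt_eq_foldl, b_fold, a_maxfold]
  cases h : pvSpec l with
  | none =>
    simp [pvMerge, spec_none_pm l h, scan_none _ l (spec_none_no_pal l h)]
  | some b =>
    simp only [pvMerge, Nat.zero_max]
    exact scan_some l b (pvPm l) h (spec_some_pm l b h)
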